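-- pv_equiv track=rewrite | github.com/junehawk/BIKO-GenomeBoard | scripts/intake/parse_vcf.py | _is_ref_homozygous
-- ===== SOURCE A (Python) =====
-- def _is_ref_homozygous(gt: str) -> bool:
--     """Return True if GT looks like 0/0, 0|0, or the missing-data case.
--
--     Missing-data ("./.", ".|.") is conservatively treated as "not evidence
--     of a de novo event" — we want at most a PM6 call, not a false positive
--     driven by a missing parental call.
--     """
--     if not gt or gt in (".", "./.", ".|."):
--         return False
--     for delim in ("/", "|"):
--         if delim in gt:
--             alleles = gt.split(delim)
--             return all(a == "0" for a in alleles)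
--     return gt == "0"
-- ===== SOURCE B (Python) =====
-- def _is_ref_homozygous(gt: str) -> bool:
--     """One-pass character scan: even positions must be '0', odd positions must all
--     be one fixed delimiter ('/' or '|'); total length must be odd."""
--     delim = None
--     for i, ch in enumerate(gt):
--         if i % 2 == 0:
--             if ch != "0":
--                 return False
--         elif delim is None:
--             if ch not in ("/", "|"):
--                 return False
--             delim = ch
--         elif ch != delim:
--             return False
--     return len(gt) % 2 == 1
-- ===== Notes on version B (the rewrite author's own statement) =====
-- stated objective: alternative
-- what changed: Replaces the delimiter-search + split + all-parts check with a single-pass character state machine: even positions must be '0', odd positions must all equal one fixed delimiter in {'/','|'}, and the length must be odd.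
import Mathlib
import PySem

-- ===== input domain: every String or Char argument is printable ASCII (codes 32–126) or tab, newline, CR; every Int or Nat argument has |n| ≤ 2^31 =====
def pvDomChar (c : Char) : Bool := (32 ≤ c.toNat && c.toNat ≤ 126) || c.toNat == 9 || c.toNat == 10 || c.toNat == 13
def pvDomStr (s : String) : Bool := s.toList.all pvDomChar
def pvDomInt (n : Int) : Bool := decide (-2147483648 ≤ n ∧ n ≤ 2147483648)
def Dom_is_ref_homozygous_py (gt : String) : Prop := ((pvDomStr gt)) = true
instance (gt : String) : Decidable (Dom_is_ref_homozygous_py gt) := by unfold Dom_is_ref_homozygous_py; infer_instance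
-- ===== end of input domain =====

-- B is an alternative implementation: one left-to-right character scan instead of
-- delimiter search + split + all-parts test; return value only, no side effects.

-- ===== PORT A =====
-- literal transliteration of A: early return on empty/missing, then for each
-- delimiter in ("/", "|") if it occurs split on it and require every part "0",
-- else compare with "0".  String equality/split done on .toList (PySem.Chars).
def pyA (cs : List Char) : Bool :=
  if cs = [] ∨ cs = ['.'] ∨ cs = ['.', '/', '.'] ∨ cs = ['.', '|', '.'] then false
  else if PySem.Chars.isIn ['/'] cs then
    (PySem.Chars.splitOn cs ['/']).all (fun a => a == ['0'])
  else if PySem.Chars.isIn ['|'] cs then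
    (PySem.Chars.splitOn cs ['|']).all (fun a => a == ['0'])
  else cs == ['0']

def is_ref_homozygous_py (gt : String) : Bool := pyA gt.toList

-- ===== PORT B =====
-- literal transliteration of Source B's loop: i is the position, delim the delimiter
-- seen at the first odd position (None before); true = the loop never returned False.
def pyBGo (cs : List Char) (i : Nat) (delim : Option Char) : Bool :=
  match cs with
  | [] => true
  | c :: rest =>
    if i % 2 == 0 then
      if c == '0' then pyBGo rest (i + 1) delim else false
    else
      match delim with
      | none => if c == '/' || c == '|' then pyBGo rest (i + 1) (some c) else false
      | some d => if c == d then pyBGo rest (i + 1) (some d) else false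

def is_ref_homozygous_py_alt (gt : String) : Bool :=
  pyBGo gt.toList 0 none && gt.toList.length % 2 == 1

-- ===== PRECONDITION & SPEC =====
def Spec_is_ref_homozygous_py (gt : String) (out : Bool) : Prop := out = is_ref_homozygous_py_alt gt
instance (gt : String) (out : Bool) : Decidable (Spec_is_ref_homozygous_py gt out) := by unfold Spec_is_ref_homozygous_py; infer_instance

-- ===== CLAIM (what is proved, stated in full; the proofs are below) =====
def Claim_equal_is_ref_homozygous_py : Prop := ∀ (gt : String), Dom_is_ref_homozygous_py gt → Spec_is_ref_homozygous_py gt (is_ref_homozygous_py gt)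

-- ===== LEMMAS AND PROOFS =====

-- canonical reference-homozygous string with delimiter d: canon d n = "0" (d "0")^n
def canon (d : Char) : Nat → List Char
  | 0 => ['0']
  | n + 1 => '0' :: d :: canon d n

-- simple structural split on a single character (proof-side model of splitOn cs [d])
def mySplit (d : Char) : List Char → List (List Char)
  | [] => [[]]
  | c :: rest =>
    if c = d then [] :: mySplit d rest
    else
      match mySplit d rest with
      | [] => [[c]]
      | p :: ps => (c :: p) :: ps

def consHead (pre : List Char) : List (List Char) → List (List Char)
  | [] => [pre]
  | p :: ps => (pre ++ p) :: ps

lemma mySplit_ne_nil (d : Char) (cs : List Char) : mySplit d cs ≠ [] := by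
  cases cs with
  | nil => simp [mySplit]
  | cons c rest =>
    simp only [mySplit]
    split
    · simp
    · split <;> simp

lemma splitOn_go_eq (d : Char) (fuel : Nat) (l cur : List Char) (acc : List (List Char))
    (h : l.length < fuel) :
    PySem.Chars.splitOn.go [d] fuel l cur acc = acc.reverse ++ consHead cur.reverse (mySplit d l) := by
  induction fuel generalizing l cur acc with
  | zero => omega
  | succ fuel ih =>
    cases l with
    | nil =>
      cases hms : mySplit d ([] : List Char) <;> simp_all [PySem.Chars.splitOn.go, mySplit, consHead]
    | cons c rest =>
      simp only [PySem.Chars.splitOn.go]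
      by_cases hc : c = d
      · subst hc
        have hpre : ([c] : List Char).isPrefixOf (c :: rest) = true := by
          simp [List.isPrefixOf]
        rw [if_pos hpre]
        rw [show List.drop ([c] : List Char).length (c :: rest) = rest from rfl]
        rw [ih rest [] (cur.reverse :: acc) (by simp at h; omega)]
        cases hms : mySplit c rest with
        | nil => exact absurd hms (mySplit_ne_nil c rest)
        | cons p ps =>
          simp [mySplit, hms, consHead]
      · have hpre : ([d] : List Char).isPrefixOf (c :: rest) = false := by
          simp [List.isPrefixOf]
          intro h'; exact absurd h'.symm hc
        rw [if_neg (by simp [hpre])]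
        rw [ih rest (c :: cur) acc (by simp at h ⊢; omega)]
        cases hms : mySplit d rest with
        | nil => exact absurd hms (mySplit_ne_nil d rest)
        | cons p ps =>
          simp [mySplit, hms, consHead, if_neg hc]

lemma splitOn_eq_mySplit (d : Char) (cs : List Char) :
    PySem.Chars.splitOn cs [d] = mySplit d cs := by
  unfold PySem.Chars.splitOn
  rw [splitOn_go_eq d (cs.length + 1) cs [] [] (Nat.lt_succ_self _)]
  cases hms : mySplit d cs with
  | nil => exact absurd hms (mySplit_ne_nil d cs)
  | cons p ps => simp [consHead]

-- two-step recursor for lists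
def twoStep {P : List Char → Prop} (h0 : P []) (h1 : ∀ c, P [c])
    (h2 : ∀ c e rest, P rest → P (c :: e :: rest)) : ∀ cs, P cs
  | [] => h0
  | [c] => h1 c
  | c :: e :: rest => h2 c e rest (twoStep h0 h1 h2 rest)

lemma mem_canon {d x : Char} {n : Nat} (hx : x ∈ canon d n) : x = '0' ∨ x = d := by
  induction n with
  | zero => simp [canon] at hx; exact Or.inl hx
  | succ n ih =>
    simp only [canon, List.mem_cons] at hx
    rcases hx with h | h | h
    · exact Or.inl h
    · exact Or.inr h
    · exact ih h

lemma mem_canon_self (d : Char) (n : Nat) : d ∈ canon d (n + 1) := by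
  simp [canon]

lemma canon_length (d : Char) (n : Nat) : (canon d n).length = 2 * n + 1 := by
  induction n with
  | zero => simp [canon]
  | succ n ih => simp [canon, ih]; omega

lemma mySplit_all_iff (d : Char) (hd : d ≠ '0') :
    ∀ cs : List Char, ((mySplit d cs).all (fun a => a == ['0']) = true ↔ ∃ n, cs = canon d n) := by
  refine twoStep ?_ ?_ ?_
  · constructor
    · intro h; simp [mySplit] at h
    · rintro ⟨n, hn⟩; cases n <;> simp [canon] at hn
  · intro c
    constructor
    · intro h
      by_cases hc : c = d
      · subst hc; simp [mySplit] at h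
      · simp [mySplit, hc] at h
        exact ⟨0, by simp [canon, h]⟩
    · rintro ⟨n, hn⟩
      cases n with
      | zero =>
        simp [canon] at hn; subst hn
        simp [mySplit, Ne.symm hd]
      | succ m => simp [canon] at hn
  · intro c e rest ih
    constructor
    · intro h
      by_cases hc : c = d
      · subst hc; simp [mySplit] at h
      · by_cases he : e = d
        · have hsplit : mySplit d (c :: e :: rest) = [c] :: mySplit d rest := by
            simp [mySplit, hc, he]
          rw [hsplit] at h
          simp only [List.all_cons, Bool.and_eq_true, beq_iff_eq] at h
          obtain ⟨hc0, hrest⟩ := h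
          have hc0' : c = '0' := by simpa using hc0
          obtain ⟨n, hn⟩ := ih.mp hrest
          exact ⟨n + 1, by simp [canon, hc0', hn, he]⟩
        · -- e is neither: the first part contains e, so it is not ['0']
          obtain ⟨p, ps, hsplit⟩ : ∃ p ps, mySplit d (c :: e :: rest) = (c :: e :: p) :: ps := by
            cases hms : mySplit d rest with
            | nil => exact absurd hms (mySplit_ne_nil d rest)
            | cons p ps => exact ⟨p, ps, by simp [mySplit, hc, he, hms]⟩
          rw [hsplit] at h
          simp at h
    · rintro ⟨n, hn⟩
      cases n with
      | zero => simp [canon] at hn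
      | succ m =>
        obtain ⟨hc, he, hrest⟩ : c = '0' ∧ e = d ∧ rest = canon d m := by
          simpa [canon] using hn
        have hcd : ¬ c = d := by rw [hc]; exact Ne.symm hd
        have hall := ih.mpr ⟨m, hrest⟩
        have hsplit : mySplit d (c :: e :: rest) = [c] :: mySplit d rest := by
          simp [mySplit, hcd, he]
        rw [hsplit, List.all_cons]
        simp [hc, hall]

-- the joint language L: what both programs accept
def Lang (cs : List Char) : Prop :=
  cs = ['0'] ∨ (∃ n, cs = canon '/' (n + 1)) ∨ (∃ n, cs = canon '|' (n + 1))

lemma singleton_isIn_iff (c : Char) (cs : List Char) :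
    PySem.Chars.isIn [c] cs = true ↔ c ∈ cs := by
  rw [PySem.Chars.isIn_iff_infix]
  constructor
  · intro h; exact h.mem (by simp)
  · intro h
    obtain ⟨l, r, hlr⟩ := List.append_of_mem h
    exact ⟨l, r, by simp [hlr]⟩

-- B accepts every canonical string (loop in even state with delimiter fixed)
lemma pyBGo_canon (d : Char) (n : Nat) (i : Nat) (hi : i % 2 = 0) :
    pyBGo (canon d n) i (some d) = true := by
  induction n generalizing i with
  | zero => simp [canon, pyBGo, hi]
  | succ m ih =>
    have h1 : (i + 1) % 2 = 1 := by omega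
    have h2 : (i + 2) % 2 = 0 := by omega
    simp only [canon, pyBGo, hi]
    simp [h1, ih (i + 2) h2]

-- B rejects or accepts exactly the canonical strings: forward direction, delimiter known
lemma pyBGo_some_canon (d : Char) :
    ∀ cs : List Char, ∀ i : Nat, i % 2 = 0 → pyBGo cs i (some d) = true →
      cs.length % 2 = 1 → ∃ n, cs = canon d n := by
  refine twoStep ?_ ?_ ?_
  · intro i _ _ hlen; simp at hlen
  · intro c i hi h _
    by_cases hc : c = '0'
    · exact ⟨0, by simp [canon, hc]⟩
    · simp [pyBGo, hi, hc] at h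
  · intro c e rest ih i hi h hlen
    have h1 : (i + 1) % 2 = 1 := by omega
    by_cases hc : c = '0'
    · by_cases he : e = d
      · simp only [pyBGo, hi, hc, h1] at h
        simp [he] at h
        obtain ⟨n, hn⟩ := ih (i + 1 + 1) (by omega) h
          (by simp only [List.length_cons] at hlen; omega)
        exact ⟨n + 1, by simp [canon, hc, he, hn]⟩
      · simp [pyBGo, hi, hc, h1, he] at h
    · simp [pyBGo, hi, hc] at h

lemma pyB_iff_Lang (cs : List Char) :
    (pyBGo cs 0 none && cs.length % 2 == 1) = true ↔ Lang cs := by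
  constructor
  · intro h
    simp only [Bool.and_eq_true, beq_iff_eq] at h
    obtain ⟨hgo, hlen⟩ := h
    match cs, hgo, hlen with
    | [], _, hlen => simp at hlen
    | [c], hgo, _ =>
      by_cases hc : c = '0'
      · exact Or.inl (by simp [hc])
      · simp [pyBGo, hc] at hgo
    | c :: e :: rest, hgo, hlen =>
      by_cases hc : c = '0'
      · by_cases he : e = '/' ∨ e = '|'
        · have hrest : pyBGo rest 2 (some e) = true := by
            rcases he with he | he <;> simpa [pyBGo, hc, he] using hgo
          obtain ⟨n, hn⟩ := pyBGo_some_canon e rest 2 (by omega) hrest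
            (by simp only [List.length_cons] at hlen; omega)
          rcases he with he | he
          · exact Or.inr (Or.inl ⟨n, by simp [canon, hc, he, hn]⟩)
          · exact Or.inr (Or.inr ⟨n, by simp [canon, hc, he, hn]⟩)
        · have he1 : ¬ e = '/' := fun h' => he (Or.inl h')
          have he2 : ¬ e = '|' := fun h' => he (Or.inr h')
          simp [pyBGo, hc, he1, he2] at hgo
      · simp [pyBGo, hc] at hgo
  · intro h
    have key : ∀ d : Char, (d = '/' ∨ d = '|') → ∀ n : Nat,
        (pyBGo (canon d (n + 1)) 0 none && (canon d (n + 1)).length % 2 == 1) = true := by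
      intro d hd n
      have hgo : pyBGo (canon d (n + 1)) 0 none = true := by
        have htail := pyBGo_canon d n 2 (by omega)
        rcases hd with h' | h' <;> subst h' <;> simp [canon, pyBGo, htail]
      have hmod : (2 * (n + 1) + 1) % 2 = 1 := by omega
      simp [hgo, canon_length, hmod]
    rcases h with h | ⟨n, hn⟩ | ⟨n, hn⟩
    · subst h; decide
    · rw [hn]; exact key '/' (Or.inl rfl) n
    · rw [hn]; exact key '|' (Or.inr rfl) n

lemma pyA_iff_Lang (cs : List Char) : pyA cs = true ↔ Lang cs := by
  unfold pyA Lang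
  by_cases h0 : cs = [] ∨ cs = ['.'] ∨ cs = ['.', '/', '.'] ∨ cs = ['.', '|', '.']
  · rw [if_pos h0]
    constructor
    · intro h; exact absurd h (by simp)
    · intro hL
      have hB := (pyB_iff_Lang cs).mpr (show Lang cs from hL)
      rcases h0 with h' | h' | h' | h' <;> rw [h'] at hB <;> exact absurd hB (by decide)
  · rw [if_neg h0]
    by_cases hs : PySem.Chars.isIn ['/'] cs = true
    · rw [if_pos hs]
      have hmem : '/' ∈ cs := (singleton_isIn_iff _ _).mp hs
      rw [splitOn_eq_mySplit, mySplit_all_iff '/' (by decide) cs]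
      constructor
      · rintro ⟨n, hn⟩
        cases n with
        | zero => rw [hn] at hmem; exact absurd hmem (by decide)
        | succ m => exact Or.inr (Or.inl ⟨m, hn⟩)
      · rintro (h | ⟨n, hn⟩ | ⟨n, hn⟩)
        · rw [h] at hmem; exact absurd hmem (by decide)
        · exact ⟨n + 1, hn⟩
        · rw [hn] at hmem
          rcases mem_canon hmem with h | h <;> exact absurd h (by decide)
    · rw [if_neg hs]
      have hmem : '/' ∉ cs := fun h => hs ((singleton_isIn_iff _ _).mpr h)
      by_cases hs2 : PySem.Chars.isIn ['|'] cs = true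
      · rw [if_pos hs2]
        have hmem2 : '|' ∈ cs := (singleton_isIn_iff _ _).mp hs2
        rw [splitOn_eq_mySplit, mySplit_all_iff '|' (by decide) cs]
        constructor
        · rintro ⟨n, hn⟩
          cases n with
          | zero => rw [hn] at hmem2; exact absurd hmem2 (by decide)
          | succ m => exact Or.inr (Or.inr ⟨m, hn⟩)
        · rintro (h | ⟨n, hn⟩ | ⟨n, hn⟩)
          · rw [h] at hmem2; exact absurd hmem2 (by decide)
          · exact absurd (hn ▸ hmem) (by simp [mem_canon_self])
          · exact ⟨n + 1, hn⟩
      · rw [if_neg hs2]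
        have hmem2 : '|' ∉ cs := fun h => hs2 ((singleton_isIn_iff _ _).mpr h)
        simp only [beq_iff_eq]
        constructor
        · intro h; exact Or.inl h
        · rintro (h | ⟨n, hn⟩ | ⟨n, hn⟩)
          · exact h
          · exact absurd (hn ▸ hmem) (by simp [mem_canon_self])
          · exact absurd (hn ▸ hmem2) (by simp [mem_canon_self])

lemma pyA_eq_pyB (cs : List Char) :
    pyA cs = (pyBGo cs 0 none && cs.length % 2 == 1) := by
  by_cases h : Lang cs
  · rw [(pyA_iff_Lang cs).mpr h, (pyB_iff_Lang cs).mpr h]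
  · rw [Bool.eq_false_iff.mpr (fun hh => h ((pyA_iff_Lang cs).mp hh)),
        Bool.eq_false_iff.mpr (fun hh => h ((pyB_iff_Lang cs).mp hh))]

-- ===== VERDICT (by name: the statement is the Claim_ definition above) =====
theorem is_ref_homozygous_py_spec : Claim_equal_is_ref_homozygous_py := by
  intro gt _
  unfold Spec_is_ref_homozygous_py is_ref_homozygous_py is_ref_homozygous_py_alt
  exact pyA_eq_pyB gt.toList
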